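-- pv_equiv track=rewrite | github.com/faizanxgp/benyon_sports_old | routers/utils/misc_files_utils.py | has_hierarchical_permission
-- ===== SOURCE A (Python) =====
-- def has_hierarchical_permission(target_path, permissions, roles):
--     """
--     Check if the target_path has permission based on hierarchical access.
--     A user with permission to a parent directory should have access to all subdirectories and files.
--
--     Args:
--         target_path: The path to check permission for (e.g., 'backup/file.txt')
--         permissions: List of permission paths (e.g., ['.', 'docs'])
--
--     Returns:
--         bool: True if access is granted, False otherwise
--     """
--
--     if "admin" in roles:
--         # If user has admin role, grant access to everything
--         return True
--
--     # Normalize the target path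
--     if target_path == '.':
--         target_path = ''
--
--     for permission in permissions:
--         # Normalize permission path
--         if permission == '.':
--             permission = ''
--
--         # Check exact match
--         if target_path == permission:
--             return True
--
--         # Check if permission is a parent directory of target_path
--         if permission == '':  # Root permission grants access to everything
--             return True
--         elif target_path.startswith(permission + '/'):
--             return True
--
--         # Check if target_path is within the permission directory
--         # This handles cases where permission might be 'docs' and target is 'docs/subfolder/file.txt'
--         if permission != '' and (target_path == permission or target_path.startswith(permission + '/')):
--             return True
--
--     return False
-- ===== SOURCE B (Python) =====
-- def has_hierarchical_permission(target_path, permissions, roles):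
--     if "admin" in roles:
--         return True
--     t = '' if target_path == '.' else target_path
--     granted = {('' if p == '.' else p) for p in permissions}
--     if '' in granted or t in granted:
--         return True
--     return any(t[:i] in granted for i, c in enumerate(t) if c == '/')
-- ===== Notes on version B (the rewrite author's own statement) =====
-- stated objective: faster
-- what changed: Instead of scanning every permission and string-prefix-testing each against the target (O(P*L)), B builds a hash set of normalized permissions once and probes it with the target and each of its ancestor prefixes ending at a '/' (O(P + depth) expected).
import Mathlib
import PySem

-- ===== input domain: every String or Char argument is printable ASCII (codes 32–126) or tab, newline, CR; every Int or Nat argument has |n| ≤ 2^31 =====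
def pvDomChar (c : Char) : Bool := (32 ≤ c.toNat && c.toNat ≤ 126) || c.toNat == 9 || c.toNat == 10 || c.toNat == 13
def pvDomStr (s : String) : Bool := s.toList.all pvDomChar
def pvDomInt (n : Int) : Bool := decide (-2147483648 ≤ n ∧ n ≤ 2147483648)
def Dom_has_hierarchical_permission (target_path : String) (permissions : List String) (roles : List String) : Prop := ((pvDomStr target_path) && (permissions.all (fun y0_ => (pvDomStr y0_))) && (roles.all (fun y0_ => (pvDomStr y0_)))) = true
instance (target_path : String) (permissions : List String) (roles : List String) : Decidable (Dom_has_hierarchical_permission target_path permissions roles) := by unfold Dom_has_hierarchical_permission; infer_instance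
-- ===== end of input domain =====

-- B replaces A's per-permission prefix scan by one hash set of normalized permissions
-- probed with the target and each ancestor prefix ending at a '/': asymptotically faster (O(P+L) vs O(P*L)).

-- ===== PORT A =====
-- A's for-loop over permissions, step for step (return True ⇒ Bool true, fall through ⇒ recurse).
def pvALoop (t : List Char) : List String → Bool
  | [] => false
  | p :: rest =>
    let q : List Char := if p == "." then [] else p.toList
    if t == q then true
    else if q == ([] : List Char) then true
    else if PySem.Chars.startswith t (q ++ ['/']) then true
    else if (!(q == ([] : List Char))) && (t == q || PySem.Chars.startswith t (q ++ ['/'])) then true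
    else pvALoop t rest

def has_hierarchical_permission (target_path : String) (permissions : List String) (roles : List String) : Bool :=
  if roles.contains "admin" then true
  else
    let t : List Char := if target_path == "." then [] else target_path.toList
    pvALoop t permissions

-- ===== PORT B =====
def pvNorm (p : String) : List Char := if p == "." then [] else p.toList

-- the non-admin check of Source B: hash-set of normalized permissions, probed with t and its '/'-ancestors
def pvBCheck (t : List Char) (ps : List String) : Bool :=
  let granted : PySem.Set (List Char) := PySem.Set.ofList (ps.map pvNorm)
  if granted.contains ([] : List Char) || granted.contains t then true
  else (PySem.List.enumerate t).any
    (fun ic => ic.2 == '/' && granted.contains (PySem.List.slice t none (some ic.1)))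

def has_hierarchical_permission_alt (target_path : String) (permissions : List String) (roles : List String) : Bool :=
  if roles.contains "admin" then true
  else
    let t : List Char := if target_path == "." then [] else target_path.toList
    pvBCheck t permissions

-- ===== PRECONDITION & SPEC =====
def Spec_has_hierarchical_permission (target_path : String) (permissions : List String) (roles : List String) (out : Bool) : Prop := out = has_hierarchical_permission_alt target_path permissions roles
instance (target_path : String) (permissions : List String) (roles : List String) (out : Bool) : Decidable (Spec_has_hierarchical_permission target_path permissions roles out) := by unfold Spec_has_hierarchical_permission; infer_instance

-- ===== CLAIM (what is proved, stated in full; the proofs are below) =====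
def Claim_equal_has_hierarchical_permission : Prop := ∀ (target_path : String) (permissions : List String) (roles : List String), Dom_has_hierarchical_permission target_path permissions roles → Spec_has_hierarchical_permission target_path permissions roles (has_hierarchical_permission target_path permissions roles)

-- ===== LEMMAS AND PROOFS =====

-- The per-permission test A performs, on the normalized permission q.
def pvCond (t q : List Char) : Bool :=
  t == q || q == ([] : List Char) || PySem.Chars.startswith t (q ++ ['/'])

theorem pv_isEmpty_false (p : String) (h : ¬ p = "") : p.toList.isEmpty = false := by
  rcases hl : p.toList with _ | ⟨a, l⟩
  · exact absurd (String.toList_inj.mp hl) h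
  · rfl

theorem pvALoop_eq_any (t : List Char) (ps : List String) :
    pvALoop t ps = ps.any (fun p => pvCond t (pvNorm p)) := by
  induction ps with
  | nil => rfl
  | cons p rest ih =>
    simp only [pvALoop, List.any_cons, pvCond, pvNorm, ← ih]
    split_ifs with h1 h2 h3 h4 <;> simp_all [pvCond, pvNorm, pv_isEmpty_false, beq_eq_decide]

theorem pv_startswith_iff (t q : List Char) :
    PySem.Chars.startswith t (q ++ ['/']) = true ↔
      ∃ i : Nat, ∃ _ : i < t.length, t.take i = q ∧ t[i] = '/' := by
  simp only [PySem.Chars.startswith, List.isPrefixOf_iff_prefix]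
  constructor
  · rintro ⟨r, hr⟩
    subst hr
    rw [List.append_assoc]
    refine ⟨q.length, by simp, List.take_left, ?_⟩
    rw [List.getElem_append_right (le_refl q.length)]
    simp
  · rintro ⟨i, hi, htake, hget⟩
    refine ⟨t.drop (i + 1), ?_⟩
    have h1 : t.take (i + 1) = q ++ ['/'] := by
      rw [List.take_add_one, htake, List.getElem?_eq_getElem hi, hget]; rfl
    calc q ++ ['/'] ++ t.drop (i + 1) = t.take (i + 1) ++ t.drop (i + 1) := by rw [h1]
      _ = t := List.take_append_drop _ _

theorem pv_core (t : List Char) (ps : List String) :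
    ps.any (fun p => pvCond t (pvNorm p)) =
      ((PySem.Set.ofList (ps.map pvNorm)).contains ([] : List Char)
        || (PySem.Set.ofList (ps.map pvNorm)).contains t
        || (PySem.List.enumerate t).any
            (fun ic => ic.2 == '/' &&
              (PySem.Set.ofList (ps.map pvNorm)).contains (PySem.List.slice t none (some ic.1)))) := by
  apply Bool.eq_iff_iff.mpr
  simp only [List.any_eq_true, Bool.or_eq_true, Bool.and_eq_true,
    PySem.Set.contains_iff, PySem.Set.mem_ofList, List.mem_map, PySem.List.mem_enumerate_iff]
  constructor
  · rintro ⟨p, hp, hc⟩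
    simp only [pvCond, Bool.or_eq_true, beq_iff_eq] at hc
    rcases hc with (ht | hq) | hsw
    · exact Or.inl (Or.inr ⟨p, hp, ht.symm⟩)
    · exact Or.inl (Or.inl ⟨p, hp, hq⟩)
    · obtain ⟨i, hi, htake, hget⟩ := (pv_startswith_iff t (pvNorm p)).mp hsw
      refine Or.inr ⟨((i : Int), t[i]), ⟨i, hi, by simp⟩, by simp [hget], p, hp, ?_⟩
      show pvNorm p = PySem.List.slice t none (some (i : Int))
      rw [PySem.List.slice_to t (Int.natCast_nonneg i)]
      simpa using htake.symm
  · rintro ((⟨p, hp, hq⟩ | ⟨p, hp, ht⟩) | ⟨ic, ⟨i, hi, hic⟩, hslash, p, hp, hmem⟩)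
    · exact ⟨p, hp, by simp [pvCond, hq]⟩
    · exact ⟨p, hp, by simp [pvCond, ht]⟩
    · subst hic
      simp only [zero_add] at hslash hmem
      rw [PySem.List.slice_to t (Int.natCast_nonneg i)] at hmem
      refine ⟨p, hp, ?_⟩
      simp only [pvCond, Bool.or_eq_true, beq_iff_eq]
      refine Or.inr ((pv_startswith_iff t (pvNorm p)).mpr ⟨i, hi, ?_, by simpa using hslash⟩)
      simpa using hmem.symm

theorem pv_or_ite (d c : Bool) : (d || c) = if d then true else c := by
  cases d <;> rfl

theorem pv_loop_eq_check (t : List Char) (ps : List String) :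
    pvALoop t ps = pvBCheck t ps := by
  rw [pvALoop_eq_any, pv_core, pv_or_ite]
  rfl

-- ===== VERDICT (by name: the statement is the Claim_ definition above) =====
theorem has_hierarchical_permission_spec : Claim_equal_has_hierarchical_permission := by
  intro target_path permissions roles _
  unfold Spec_has_hierarchical_permission
  unfold has_hierarchical_permission has_hierarchical_permission_alt
  cases hc : roles.contains "admin"
  · rw [if_neg Bool.false_ne_true, if_neg Bool.false_ne_true]
    exact pv_loop_eq_check _ _
  · rfl
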